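-- pv_equiv track=rewrite | github.com/DalilaPirvu/Workable | bubble_codes/bubble_tools.py | find_order_changes
-- ===== SOURCE A (Python) =====
-- def find_order_changes(arr):
--     changes = []  # Initialize a list to store indices where changes occur
--     decreasing = False  # Initialize a flag to track if the array is decreasing
--
--     for i in range(len(arr) - 1):
--         # If the current element is less than the next, and the array was previously decreasing
--         if arr[i] < arr[i + 1]:
--             if decreasing:
--                 # Add the index to the list of changes and break the loop
--                 changes.append(i)
--                 break
--         # If the current element is greater than the next, set the decreasing flag
--         elif arr[i] > arr[i + 1]:
--             if not decreasing:
--                 decreasing = True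
--             # If a change was recorded and the previous change is at the current index, remove it
--             if changes and changes[-1] == i:
--                 changes.pop()
--         # If any changes were recorded, break the loop
--         if len(changes) != 0:
--             break
--         # Skip if the elements are equal (not considered a change in trend)
--     # If no changes were found, set the change to index 0
--     if changes == []:
--         changes = [0]
--     # Return the index of the first change
--     return changes[0]
-- ===== SOURCE B (Python) =====
-- def find_order_changes(arr):
--     n = len(arr) - 1
--     incs = [i for i in range(n) if arr[i] < arr[i + 1]]
--     decs = [i for i in range(n) if arr[i] > arr[i + 1]]
--     if not decs:
--         return 0
--     d = decs[0]
--     lo, hi = 0, len(incs)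
--     while lo < hi:
--         mid = (lo + hi) // 2
--         if incs[mid] <= d:
--             lo = mid + 1
--         else:
--             hi = mid
--     return incs[lo] if lo < len(incs) else 0
-- ===== Notes on version B (the rewrite author's own statement) =====
-- stated objective: alternative
-- what changed: B materializes the increase and decrease index lists with comprehensions and then binary-searches the sorted increase list for the first entry past the first decrease, replacing A's stateful flag-and-list single scan.
import Mathlib
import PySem

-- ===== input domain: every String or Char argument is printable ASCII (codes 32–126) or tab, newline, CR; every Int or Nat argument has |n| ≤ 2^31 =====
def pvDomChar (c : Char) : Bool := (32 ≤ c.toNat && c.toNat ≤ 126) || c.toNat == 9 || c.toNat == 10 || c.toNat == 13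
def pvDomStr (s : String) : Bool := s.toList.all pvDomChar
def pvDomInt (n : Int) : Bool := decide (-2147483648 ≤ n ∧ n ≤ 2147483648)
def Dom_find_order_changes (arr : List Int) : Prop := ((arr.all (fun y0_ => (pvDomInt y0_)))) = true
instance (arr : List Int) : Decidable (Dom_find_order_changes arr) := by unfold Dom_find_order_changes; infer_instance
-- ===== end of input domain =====

-- B builds the increase/decrease index lists up front and binary-searches the sorted increase
-- list for the first entry past the first decrease, instead of A's stateful flag-and-list scan;
-- objective: alternative.

-- ===== PORT A =====
-- loop over range(len(arr)-1) with state (changes, decreasing); `break` becomes an early return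
def pvA_loop (arr : List Int) : List Nat → List Int → Bool → List Int
  | [], changes, _ => changes
  | i :: rest, changes, decreasing =>
    if arr.getD i 0 < arr.getD (i + 1) 0 then
      if decreasing then changes ++ [(i : Int)]   -- append then break
      else if changes.length ≠ 0 then changes else pvA_loop arr rest changes decreasing
    else if arr.getD i 0 > arr.getD (i + 1) 0 then
      let changes' := if changes ≠ [] ∧ changes.getLast? = some (i : Int) then changes.dropLast else changes
      if changes'.length ≠ 0 then changes' else pvA_loop arr rest changes' true
    else
      if changes.length ≠ 0 then changes else pvA_loop arr rest changes decreasing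

def find_order_changes (arr : List Int) : Int :=
  let changes := pvA_loop arr (List.range (arr.length - 1)) [] false
  let changes := if changes = [] then ([0] : List Int) else changes
  changes.headD 0   -- changes[0]; the list is nonempty here, so headD is exact

-- ===== PORT B =====
-- the while-loop binary search: first position in incs whose entry exceeds d
def pvBS (incs : List Nat) (d : Nat) (lo hi : Nat) : Nat :=
  if h : lo < hi then
    let mid := (lo + hi) / 2
    if incs.getD mid 0 ≤ d then pvBS incs d (mid + 1) hi else pvBS incs d lo mid
  else lo
termination_by hi - lo
decreasing_by
  · have : (lo + hi) / 2 < hi := by omega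
    omega
  · have : lo ≤ (lo + hi) / 2 := by omega
    omega

def find_order_changes_alt (arr : List Int) : Int :=
  let n := arr.length - 1
  let incs := (List.range n).filter (fun i => arr.getD i 0 < arr.getD (i + 1) 0)
  let decs := (List.range n).filter (fun i => arr.getD i 0 > arr.getD (i + 1) 0)
  match decs.head? with
  | none => 0
  | some d =>
    let lo := pvBS incs d 0 incs.length
    if lo < incs.length then (incs.getD lo 0 : Int) else 0

-- ===== PRECONDITION & SPEC =====
def Spec_find_order_changes (arr : List Int) (out : Int) : Prop := out = find_order_changes_alt arr
instance (arr : List Int) (out : Int) : Decidable (Spec_find_order_changes arr out) := by unfold Spec_find_order_changes; infer_instance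

-- ===== CLAIM (what is proved, stated in full; the proofs are below) =====
def Claim_equal_find_order_changes : Prop := ∀ (arr : List Int), Dom_find_order_changes arr → Spec_find_order_changes arr (find_order_changes arr)

-- ===== LEMMAS AND PROOFS =====

-- first-match scans used to characterise A's loop
def pvFirstDec (arr : List Int) : List Nat → Option Nat
  | [] => none
  | k :: rest => if arr.getD k 0 > arr.getD (k + 1) 0 then some k else pvFirstDec arr rest

def pvFirstInc (arr : List Int) : List Nat → Option Nat
  | [] => none
  | k :: rest => if arr.getD k 0 < arr.getD (k + 1) 0 then some k else pvFirstInc arr rest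

-- phase 2 of A's loop (decreasing = true, changes = []) is a first-increase scan
theorem pvA_loop_true (arr : List Int) (l : List Nat) :
    pvA_loop arr l [] true =
      (match pvFirstInc arr l with
       | none => ([] : List Int)
       | some i => [(i : Int)]) := by
  induction l with
  | nil => simp [pvA_loop, pvFirstInc]
  | cons k rest ih =>
    simp only [pvA_loop, pvFirstInc]
    by_cases h1 : arr[k]?.getD 0 < arr[k + 1]?.getD 0
    · simp [List.getD, h1]
    · simp [List.getD, h1, ih]

-- phase 1 of A's loop is a first-decrease scan handing over to phase 2
theorem pvA_loop_false (arr : List Int) (n s : Nat) :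
    pvA_loop arr (List.range' s n) [] false =
      (match pvFirstDec arr (List.range' s n) with
       | none => ([] : List Int)
       | some d =>
         match pvFirstInc arr (List.range' (d + 1) (s + n - (d + 1))) with
         | none => ([] : List Int)
         | some i => [(i : Int)]) := by
  induction n generalizing s with
  | zero => simp [pvA_loop, pvFirstDec]
  | succ m ih =>
    rw [List.range'_succ]
    simp only [pvA_loop, pvFirstDec]
    have hsm : s + 1 + m = s + (m + 1) := by omega
    by_cases h1 : arr[s]?.getD 0 < arr[s + 1]?.getD 0
    · have h2 : ¬ arr[s + 1]?.getD 0 < arr[s]?.getD 0 := by omega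
      simpa [List.getD, h1, h2, hsm] using ih (s + 1)
    · by_cases h2 : arr[s + 1]?.getD 0 < arr[s]?.getD 0
      · have hm : s + (m + 1) - (s + 1) = m := by omega
        simp [List.getD, h1, h2, pvA_loop_true, hm]
      · simpa [List.getD, h1, h2, hsm] using ih (s + 1)

-- A's value in closed form: first decrease, then first increase after it
theorem pvA_char (arr : List Int) :
    find_order_changes arr =
      (match pvFirstDec arr (List.range' 0 (arr.length - 1)) with
       | none => 0
       | some d =>
         match pvFirstInc arr (List.range' (d + 1) (arr.length - 1 - (d + 1))) with
         | none => 0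
         | some i => (i : Int)) := by
  unfold find_order_changes
  rw [List.range_eq_range', pvA_loop_false]
  cases hd : pvFirstDec arr (List.range' 0 (arr.length - 1)) with
  | none => simp
  | some d =>
    simp only [Nat.zero_add]
    cases pvFirstInc arr (List.range' (d + 1) (arr.length - 1 - (d + 1))) <;> simp

-- a first-match scan is the head of the filtered list
theorem pvFirstDec_eq_head (arr : List Int) (l : List Nat) :
    pvFirstDec arr l = (l.filter (fun k => arr.getD k 0 > arr.getD (k + 1) 0)).head? := by
  induction l with
  | nil => simp [pvFirstDec]
  | cons k rest ih =>
    rw [List.filter_cons]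
    by_cases h : arr.getD k 0 > arr.getD (k + 1) 0
    · simp only [List.getD] at h
      simp [pvFirstDec, List.getD, h]
    · simp only [List.getD] at h
      simp [pvFirstDec, List.getD, h, ih]

theorem pvFirstInc_eq_head (arr : List Int) (l : List Nat) :
    pvFirstInc arr l = (l.filter (fun k => arr.getD k 0 < arr.getD (k + 1) 0)).head? := by
  induction l with
  | nil => simp [pvFirstInc]
  | cons k rest ih =>
    rw [List.filter_cons]
    by_cases h : arr.getD k 0 < arr.getD (k + 1) 0
    · simp only [List.getD] at h
      simp [pvFirstInc, List.getD, h]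
    · simp only [List.getD] at h
      simp [pvFirstInc, List.getD, h, ih]

-- binary-search correctness on a split list: elements of L1 are ≤ d, of L2 are > d
theorem pvBS_split (L1 L2 : List Nat) (d : Nat)
    (h1 : ∀ x ∈ L1, x ≤ d) (h2 : ∀ x ∈ L2, d < x) :
    ∀ lo hi, lo ≤ L1.length → L1.length ≤ hi → hi ≤ L1.length + L2.length →
      pvBS (L1 ++ L2) d lo hi = L1.length := by
  intro lo hi
  induction lo, hi using pvBS.induct (incs := L1 ++ L2) (d := d) with
  | case1 lo hi h mid hle ih =>
    intro hlo hhi hlen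
    rw [pvBS, dif_pos h]
    show (if (L1 ++ L2).getD ((lo + hi) / 2) 0 ≤ d then pvBS (L1 ++ L2) d ((lo + hi) / 2 + 1) hi
          else pvBS (L1 ++ L2) d lo ((lo + hi) / 2)) = L1.length
    rw [if_pos hle]
    have hmidlt : mid < L1.length := by
      by_contra hc
      have hmidhi : mid < hi := by simp only [mid]; omega
      have hmid2 : mid - L1.length < L2.length := by omega
      have hgd : (L1 ++ L2).getD mid 0 = L2[mid - L1.length] := by
        rw [List.getD_eq_getElem?_getD, List.getElem?_append_right (by omega)]
        simp [hmid2]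
      rw [hgd] at hle
      have := h2 (L2[mid - L1.length]) (List.getElem_mem _)
      omega
    exact ih (by omega) hhi hlen
  | case2 lo hi h mid hgt ih =>
    intro hlo hhi hlen
    rw [pvBS, dif_pos h]
    show (if (L1 ++ L2).getD ((lo + hi) / 2) 0 ≤ d then pvBS (L1 ++ L2) d ((lo + hi) / 2 + 1) hi
          else pvBS (L1 ++ L2) d lo ((lo + hi) / 2)) = L1.length
    rw [if_neg hgt]
    have hmidge : L1.length ≤ mid := by
      by_contra hc
      have hmid1 : mid < L1.length := by omega
      have hgd : (L1 ++ L2).getD mid 0 = L1[mid] := by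
        rw [List.getD_eq_getElem?_getD, List.getElem?_append_left hmid1]
        simp [hmid1]
      rw [hgd] at hgt
      have := h1 (L1[mid]) (List.getElem_mem _)
      omega
    exact ih hlo hmidge (by omega)
  | case3 lo hi h =>
    intro hlo hhi _
    rw [pvBS, dif_neg h]
    omega

-- B's value in the same closed form
theorem pvB_char (arr : List Int) :
    find_order_changes_alt arr =
      (match pvFirstDec arr (List.range' 0 (arr.length - 1)) with
       | none => 0
       | some d =>
         match pvFirstInc arr (List.range' (d + 1) (arr.length - 1 - (d + 1))) with
         | none => 0
         | some i => (i : Int)) := by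
  simp only [find_order_changes_alt]
  rw [List.range_eq_range', pvFirstDec_eq_head]
  cases hd : ((List.range' 0 (arr.length - 1)).filter
      (fun k => arr.getD k 0 > arr.getD (k + 1) 0)).head? with
  | none => rfl
  | some d =>
    have hdmem := List.mem_of_mem_filter (List.mem_of_mem_head? hd)
    rw [List.mem_range'_1] at hdmem
    have hdlt : d < arr.length - 1 := by omega
    have hsplit : List.range' 0 (arr.length - 1) =
        List.range' 0 (d + 1) ++ List.range' (d + 1) (arr.length - 1 - (d + 1)) := by
      have hx : arr.length - 1 = (d + 1) + (arr.length - 1 - (d + 1)) := by omega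
      rw [hx, ← List.range'_append_1]
      simp
    show (if pvBS ((List.range' 0 (arr.length - 1)).filter
              (fun i => arr.getD i 0 < arr.getD (i + 1) 0)) d 0
            ((List.range' 0 (arr.length - 1)).filter
              (fun i => arr.getD i 0 < arr.getD (i + 1) 0)).length <
            ((List.range' 0 (arr.length - 1)).filter
              (fun i => arr.getD i 0 < arr.getD (i + 1) 0)).length then
          (((List.range' 0 (arr.length - 1)).filter
              (fun i => arr.getD i 0 < arr.getD (i + 1) 0)).getD
            (pvBS ((List.range' 0 (arr.length - 1)).filter
              (fun i => arr.getD i 0 < arr.getD (i + 1) 0)) d 0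
              ((List.range' 0 (arr.length - 1)).filter
                (fun i => arr.getD i 0 < arr.getD (i + 1) 0)).length) 0 : Int)
        else 0) =
      (match pvFirstInc arr (List.range' (d + 1) (arr.length - 1 - (d + 1))) with
       | none => 0
       | some i => (i : Int))
    rw [pvFirstInc_eq_head, hsplit, List.filter_append]
    set L1 := (List.range' 0 (d + 1)).filter (fun k => arr.getD k 0 < arr.getD (k + 1) 0) with hL1
    set L2 := (List.range' (d + 1) (arr.length - 1 - (d + 1))).filter
        (fun k => arr.getD k 0 < arr.getD (k + 1) 0) with hL2
    have h1 : ∀ x ∈ L1, x ≤ d := by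
      intro x hx
      have := List.mem_of_mem_filter hx
      rw [List.mem_range'_1] at this
      omega
    have h2 : ∀ x ∈ L2, d < x := by
      intro x hx
      have := List.mem_of_mem_filter hx
      rw [List.mem_range'_1] at this
      omega
    have hbs : pvBS (L1 ++ L2) d 0 (L1 ++ L2).length = L1.length :=
      pvBS_split L1 L2 d h1 h2 0 (L1 ++ L2).length (by omega) (by simp) (by simp)
    clear_value L1 L2
    cases hc : L2 with
    | nil =>
      subst hc
      have hbs' : pvBS L1 d 0 L1.length = L1.length := by simpa using hbs
      simp [hbs']
    | cons i t =>
      subst hc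
      have hbs' : pvBS (L1 ++ i :: t) d 0 (L1.length + (t.length + 1)) = L1.length := by
        simpa using hbs
      have hlen' : L1.length < L1.length + (t.length + 1) := by omega
      simp [hbs', hlen']

-- ===== VERDICT (by name: the statement is the Claim_ definition above) =====
theorem find_order_changes_spec : Claim_equal_find_order_changes := by
  intro arr _
  unfold Spec_find_order_changes
  rw [pvA_char, pvB_char]
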